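-- pv_equiv track=rewrite | github.com/cirosantilli/project-euler-solutions | solvers/874.py | min_prime_loss_for_reduction
-- ===== SOURCE A (Python) =====
-- def min_prime_loss_for_reduction(primes_first_k: list[int], reduction: int) -> int:
--     """
--     We start from all a_i = k-1, so each element contributes prime_top = p(k-1).
--     If we reduce one element by d (i.e. set it to k-1-d), the score decreases by:
--         loss[d] = p(k-1) - p(k-1-d)
--
--     Given a required total reduction 'reduction' (0 <= reduction < k),
--     find the minimal total loss among all multisets of reductions that sum to it.
--     Unbounded knapsack in O(reduction^2).
--     """
--     if reduction == 0:
--         return 0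
--
--     m = len(primes_first_k) - 1  # m = k-1
--     top = primes_first_k[m]
--
--     # loss[d] for 1..reduction
--     loss = [0] * (reduction + 1)
--     for d in range(1, reduction + 1):
--         loss[d] = top - primes_first_k[m - d]
--
--     INF = 10**30
--     dp = [INF] * (reduction + 1)
--     dp[0] = 0
--
--     # Unbounded knapsack (min-cost exact sum)
--     for d in range(1, reduction + 1):
--         c = loss[d]
--         for s in range(d, reduction + 1):
--             cand = dp[s - d] + c
--             if cand < dp[s]:
--                 dp[s] = cand
--
--     return dp[reduction]
-- ===== SOURCE B (Python) =====
-- def min_prime_loss_for_reduction(primes_first_k: list[int], reduction: int) -> int: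
--     # Tropical (min-plus) closure by repeated squaring: v[s] is the cost of a single
--     # reduction of size s (v[0] = 0); squaring v doubles the number of parts allowed,
--     # so after ceil(log2(reduction)) squarings v[reduction] is the minimal total loss.
--     if reduction == 0:
--         return 0
--     m = len(primes_first_k) - 1
--     top = primes_first_k[m]
--     v = [0] + [top - primes_first_k[m - d] for d in range(1, reduction + 1)]
--     t = 0
--     while (1 << t) < reduction:
--         t += 1
--     for _ in range(t):
--         v = [min(v[a] + v[s - a] for a in range(s + 1)) for s in range(reduction + 1)]
--     return v[reduction]
-- ===== Notes on version B (the rewrite author's own statement) =====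
-- stated objective: alternative
-- what changed: Replaces the item-major unbounded-knapsack relaxation (loss array, INF sentinel, per-item sweep) with tropical (min-plus) closure by repeated squaring: the single-reduction cost vector with v[0]=0 is min-plus-convolved with itself ceil(log2(reduction)) times, doubling the number of allowed parts each step, and the answer is read off at index reduction.
import Mathlib
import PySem

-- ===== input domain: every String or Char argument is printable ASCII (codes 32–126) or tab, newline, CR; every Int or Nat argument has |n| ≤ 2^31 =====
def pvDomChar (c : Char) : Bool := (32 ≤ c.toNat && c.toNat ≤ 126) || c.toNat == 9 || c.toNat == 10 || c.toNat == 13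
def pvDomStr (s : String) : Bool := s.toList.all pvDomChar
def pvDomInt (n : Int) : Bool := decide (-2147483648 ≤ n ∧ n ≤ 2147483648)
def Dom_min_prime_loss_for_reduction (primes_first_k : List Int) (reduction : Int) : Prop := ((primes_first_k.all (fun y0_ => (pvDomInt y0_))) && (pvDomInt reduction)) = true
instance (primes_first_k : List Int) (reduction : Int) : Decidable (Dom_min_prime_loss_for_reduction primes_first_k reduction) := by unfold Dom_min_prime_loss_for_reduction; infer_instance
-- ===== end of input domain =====

-- B replaces A's item-major unbounded-knapsack relaxation (loss array + INF sentinel) by the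
-- tropical (min-plus) closure of the single-reduction cost vector, computed by repeated
-- squaring (objective: alternative).

-- ===== PORT A =====
-- Literal port of A. xs[i] is ported as PySem.List.pyGetD xs i 0: under Pre_ every index is in
-- range (negative indices wrap as in Python), so this agrees with Python's xs[i].
def min_prime_loss_for_reduction (primes_first_k : List Int) (reduction : Int) : Int :=
  if reduction == 0 then 0
  else
    let m : Int := (primes_first_k.length : Int) - 1
    let top : Int := PySem.List.pyGetD primes_first_k m 0
    -- loss[d] for 1..reduction
    let loss : List Int :=
      (PySem.List.pyRange 1 (reduction + 1)).foldl
        (fun loss d => loss.set d.toNat (top - PySem.List.pyGetD primes_first_k (m - d) 0))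
        (List.replicate (reduction + 1).toNat 0)
    let INF : Int := 10 ^ 30
    let dp0 : List Int := (List.replicate (reduction + 1).toNat INF).set 0 0
    -- Unbounded knapsack (min-cost exact sum)
    let dpF : List Int :=
      (PySem.List.pyRange 1 (reduction + 1)).foldl
        (fun dp d =>
          let c := PySem.List.pyGetD loss d 0
          (PySem.List.pyRange d (reduction + 1)).foldl
            (fun dp s =>
              let cand := PySem.List.pyGetD dp (s - d) 0 + c
              if cand < PySem.List.pyGetD dp s 0 then dp.set s.toNat cand else dp)
            dp)
        dp0
    PySem.List.pyGetD dpF reduction 0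

-- ===== PORT B =====
-- 'while (1 << t) < reduction: t += 1' of Source B; 1 << t is 2 ^ t.
def pvTw (r : Int) (t : Nat) : Nat :=
  if (2 : Int) ^ t < r then pvTw r (t + 1) else t
termination_by (r - 2 ^ t).toNat
decreasing_by
  rename_i h
  have h1 : (0 : Int) < 2 ^ t := pow_pos (by norm_num) t
  have h2 : (2 : Int) ^ (t + 1) = 2 ^ t * 2 := pow_succ 2 t
  omega

-- Literal port of B (Source B); min(generator) is PySem.List.min? (the generator is nonempty since
-- range(s+1) is, matching Python's min which raises only on an empty iterable).
def min_prime_loss_for_reduction_alt (primes_first_k : List Int) (reduction : Int) : Int :=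
  if reduction == 0 then 0
  else
    let m : Int := (primes_first_k.length : Int) - 1
    let top : Int := PySem.List.pyGetD primes_first_k m 0
    let v0 : List Int :=
      0 :: (PySem.List.pyRange 1 (reduction + 1)).map
        (fun d => top - PySem.List.pyGetD primes_first_k (m - d) 0)
    let t : Nat := pvTw reduction 0
    let vF : List Int :=
      (List.range t).foldl
        (fun v _ =>
          (PySem.List.pyRange 0 (reduction + 1)).map
            (fun s =>
              (PySem.List.min?
                ((PySem.List.pyRange 0 (s + 1)).map
                  (fun a => PySem.List.pyGetD v a 0 + PySem.List.pyGetD v (s - a) 0)) id).getD 0))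
        v0
    PySem.List.pyGetD vF reduction 0

-- ===== PRECONDITION & SPEC =====
-- Pre_ excludes exactly the inputs where A raises IndexError: negative reduction (dp[0] = 0 on an
-- empty dp), and reduction so large that primes_first_k[m - d] falls below index -len (this
-- includes every positive reduction on an empty list); on all of these A returns no value.
def Pre_min_prime_loss_for_reduction (primes_first_k : List Int) (reduction : Int) : Prop :=
  0 ≤ reduction ∧
    (reduction = 0 ∨ (1 ≤ primes_first_k.length ∧ reduction ≤ 2 * (primes_first_k.length : Int) - 1))
instance (primes_first_k : List Int) (reduction : Int) : Decidable (Pre_min_prime_loss_for_reduction primes_first_k reduction) := by unfold Pre_min_prime_loss_for_reduction; infer_instance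

def pvWitness_min_prime_loss_for_reduction : List Int × Int := ([2, 3, 5, 7], 3)

def Spec_min_prime_loss_for_reduction (primes_first_k : List Int) (reduction : Int) (out : Int) : Prop := out = min_prime_loss_for_reduction_alt primes_first_k reduction
instance (primes_first_k : List Int) (reduction : Int) (out : Int) : Decidable (Spec_min_prime_loss_for_reduction primes_first_k reduction out) := by unfold Spec_min_prime_loss_for_reduction; infer_instance

-- ===== CLAIM (what is proved, stated in full; the proofs are below) =====
def Claim_equal_min_prime_loss_for_reduction : Prop := ∀ (primes_first_k : List Int) (reduction : Int), Dom_min_prime_loss_for_reduction primes_first_k reduction → Pre_min_prime_loss_for_reduction primes_first_k reduction → Spec_min_prime_loss_for_reduction primes_first_k reduction (min_prime_loss_for_reduction primes_first_k reduction)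

-- ===== LEMMAS AND PROOFS =====

-- One item-major relaxation pass with item size d and cost cc over a base table g (A's inner loop,
-- read as a function of the target sum).
def pvRelax (cc : Int) (d : Nat) (g : Nat → Int) (s : Nat) : Int :=
  if _h : s < d ∨ d = 0 then g s
  else min (pvRelax cc d g (s - d) + cc) (g s)
termination_by s
decreasing_by omega

-- A's dp table after processing items 1..D (as a function of the target sum s).
def pvG (c : Nat → Int) : Nat → Nat → Int
  | 0 => fun s => if s = 0 then 0 else 10 ^ 30
  | D + 1 => pvRelax (c (D + 1)) (D + 1) (pvG c D)

-- The optimum: min over the last reduction d ∈ [1, s] of pvH (s-d) + c d.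
def pvH (c : Nat → Int) (s : Nat) : Int :=
  if _h : s = 0 then 0
  else (PySem.List.min?
          ((List.range s).attach.map (fun i => pvH c (s - 1 - i.1) + c (i.1 + 1))) id).getD 0
termination_by s
decreasing_by
  have := List.mem_range.mp i.2; omega

-- One min-plus squaring step, as a function of the target sum.
def pvSqF (f : Nat → Int) (s : Nat) : Int :=
  (PySem.List.min? ((List.range (s + 1)).map (fun a => f a + f (s - a))) id).getD 0

-- B's vector after t squarings, as a function of the index.
def pvF (c : Nat → Int) : Nat → Nat → Int
  | 0 => fun s => if s = 0 then 0 else c s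
  | t + 1 => pvSqF (pvF c t)

theorem pvG_succ_lt (c : Nat → Int) (D s : Nat) (h : s < D + 1) :
    pvG c (D + 1) s = pvG c D s := by
  rw [pvG, pvRelax]; simp [h]

theorem pvG_succ_ge (c : Nat → Int) (D s : Nat) (h : D + 1 ≤ s) :
    pvG c (D + 1) s = min (pvG c (D + 1) (s - (D + 1)) + c (D + 1)) (pvG c D s) := by
  conv_lhs => rw [pvG, pvRelax]
  have : ¬ (s < D + 1 ∨ D + 1 = 0) := by omega
  simp only [this, dif_neg, not_false_iff]
  rfl

theorem pvG_zero_arg (c : Nat → Int) (D : Nat) : pvG c D 0 = 0 := by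
  induction D with
  | zero => simp [pvG]
  | succ D ih => rw [pvG_succ_lt c D 0 (by omega)]; exact ih

theorem pvH_zero (c : Nat → Int) : pvH c 0 = 0 := by rw [pvH]; simp

theorem pvH_eq_some (c : Nat → Int) (s : Nat) (hs : 1 ≤ s) :
    ∃ m, PySem.List.min?
          ((List.range s).attach.map (fun i => pvH c (s - 1 - i.1) + c (i.1 + 1))) id = some m
        ∧ pvH c s = m := by
  have hne : ((List.range s).attach.map (fun i => pvH c (s - 1 - i.1) + c (i.1 + 1))) ≠ [] := by
    simp [List.range_eq_nil]; omega
  rcases Option.ne_none_iff_exists'.mp (fun h => hne ((PySem.List.min?_eq_none_iff (κ := Int) _ id).mp h)) with ⟨m, hm⟩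
  refine ⟨m, hm, ?_⟩
  rw [pvH, dif_neg (by omega : ¬ s = 0), hm]
  rfl

theorem pvH_le (c : Nat → Int) (s d : Nat) (h1 : 1 ≤ d) (h2 : d ≤ s) :
    pvH c s ≤ pvH c (s - d) + c d := by
  rcases pvH_eq_some c s (by omega) with ⟨m, hm, hv⟩
  have hmem : pvH c (s - d) + c d ∈
      ((List.range s).attach.map (fun i => pvH c (s - 1 - i.1) + c (i.1 + 1))) := by
    refine List.mem_map.mpr ⟨⟨d - 1, List.mem_range.mpr (by omega)⟩, List.mem_attach _ _, ?_⟩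
    have h3 : s - 1 - (d - 1) = s - d := by omega
    have h4 : d - 1 + 1 = d := by omega
    rw [h3, h4]
  have := PySem.List.min?_isMin hm _ hmem
  simpa [hv] using this

theorem pvH_exists (c : Nat → Int) (s : Nat) (hs : 1 ≤ s) :
    ∃ d, 1 ≤ d ∧ d ≤ s ∧ pvH c s = pvH c (s - d) + c d := by
  rcases pvH_eq_some c s hs with ⟨m, hm, hv⟩
  have hmem := PySem.List.min?_mem hm
  rcases List.mem_map.mp hmem with ⟨⟨i, hi⟩, _, hval⟩
  have hi' := List.mem_range.mp hi
  refine ⟨i + 1, by omega, by omega, ?_⟩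
  have h3 : s - (i + 1) = s - 1 - i := by omega
  rw [hv, ← hval, h3]

-- relaxation-closure of pvG: a single extra use of item d never helps below pvG's optimum
theorem pvRel (c : Nat → Int) (D : Nat) :
    ∀ s d : Nat, 1 ≤ d → d ≤ D → d ≤ s → pvG c D s ≤ pvG c D (s - d) + c d := by
  induction D with
  | zero => intro s d h1 h2 h3; omega
  | succ D ih =>
    intro s
    induction s using Nat.strong_induction_on with
    | _ s ihs =>
      intro d h1 h2 h3
      by_cases hd : d = D + 1
      · subst hd
        rw [pvG_succ_ge c D s h3]
        exact min_le_left _ _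
      · have hdD : d ≤ D := by omega
        by_cases hs1 : s < D + 1
        · have hsd1 : s - d < D + 1 := by omega
          rw [pvG_succ_lt c D s hs1, pvG_succ_lt c D (s - d) hsd1]
          exact ih s d h1 hdD h3
        · by_cases hsd1 : s - d < D + 1
          · rw [pvG_succ_lt c D (s - d) hsd1]
            calc pvG c (D + 1) s ≤ pvG c D s := by
                  rw [pvG_succ_ge c D s (by omega)]; exact min_le_right _ _
              _ ≤ pvG c D (s - d) + c d := ih s d h1 hdD h3
          · -- s - d ≥ D + 1
            rw [pvG_succ_ge c D (s - d) (by omega)]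
            have hsD1 : D + 1 ≤ s := by omega
            have hB : pvG c (D + 1) s ≤ pvG c D (s - d) + c d := by
              calc pvG c (D + 1) s ≤ pvG c D s := by
                    rw [pvG_succ_ge c D s hsD1]; exact min_le_right _ _
                _ ≤ pvG c D (s - d) + c d := ih s d h1 hdD h3
            have hA : pvG c (D + 1) s ≤ pvG c (D + 1) (s - d - (D + 1)) + c (D + 1) + c d := by
              have st1 : pvG c (D + 1) s ≤ pvG c (D + 1) (s - (D + 1)) + c (D + 1) := by
                rw [pvG_succ_ge c D s hsD1]; exact min_le_left _ _
              have st2 : pvG c (D + 1) (s - (D + 1)) ≤ pvG c (D + 1) (s - (D + 1) - d) + c d :=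
                ihs (s - (D + 1)) (by omega) d h1 (by omega) (by omega)
              have e : s - (D + 1) - d = s - d - (D + 1) := by omega
              rw [e] at st2
              omega
            rcases min_cases (pvG c (D + 1) (s - d - (D + 1)) + c (D + 1)) (pvG c D (s - d)) with
              ⟨heq, _⟩ | ⟨heq, _⟩ <;> rw [heq] <;> omega

theorem pvG_le_H (c : Nat → Int) (D : Nat) :
    ∀ s : Nat, s ≤ D → pvG c D s ≤ pvH c s := by
  intro s
  induction s using Nat.strong_induction_on with
  | _ s ihs =>
    intro hsD
    by_cases hs : s = 0
    · subst hs; rw [pvG_zero_arg, pvH_zero]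
    · rcases pvH_exists c s (by omega) with ⟨d, h1, h2, hE⟩
      rw [hE]
      calc pvG c D s ≤ pvG c D (s - d) + c d := pvRel c D s d h1 (by omega) h2
        _ ≤ pvH c (s - d) + c d := by
            have := ihs (s - d) (by omega) (by omega)
            omega

theorem pvH_le_G (c : Nat → Int) (hc : ∀ d, 1 ≤ d → c d < 10 ^ 30) :
    ∀ s D : Nat, pvH c s ≤ pvG c D s := by
  intro s
  induction s using Nat.strong_induction_on with
  | _ s ihs =>
    intro D
    induction D with
    | zero =>
      by_cases hs : s = 0
      · subst hs; rw [pvH_zero, pvG_zero_arg]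
      · have h1 : pvH c s ≤ pvH c (s - s) + c s := pvH_le c s s (by omega) (by omega)
        have h2 : pvH c 0 = 0 := pvH_zero c
        have h3 : c s < 10 ^ 30 := hc s (by omega)
        have : pvG c 0 s = 10 ^ 30 := by rw [pvG]; simp [hs]
        rw [this]
        simp at h1
        omega
    | succ D ihD =>
      by_cases hs1 : s < D + 1
      · rw [pvG_succ_lt c D s hs1]; exact ihD
      · rw [pvG_succ_ge c D s (by omega)]
        refine le_min ?_ ihD
        have hA : pvH c s ≤ pvH c (s - (D + 1)) + c (D + 1) := pvH_le c s (D + 1) (by omega) (by omega)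
        have hB : pvH c (s - (D + 1)) ≤ pvG c (D + 1) (s - (D + 1)) := ihs (s - (D + 1)) (by omega) (D + 1)
        omega

theorem pvGH (c : Nat → Int) (hc : ∀ d, 1 ≤ d → c d < 10 ^ 30) (D s : Nat) (h : s ≤ D) :
    pvG c D s = pvH c s :=
  le_antisymm (pvG_le_H c D s h) (pvH_le_G c hc s D)

-- ---- B side: min-plus squaring reaches pvH ----

theorem pvSqF_eq_some (f : Nat → Int) (s : Nat) :
    ∃ m, PySem.List.min? ((List.range (s + 1)).map (fun a => f a + f (s - a))) id = some m
        ∧ pvSqF f s = m := by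
  have hne : ((List.range (s + 1)).map (fun a => f a + f (s - a))) ≠ [] := by
    simp [List.range_eq_nil]
  rcases Option.ne_none_iff_exists'.mp (fun h => hne ((PySem.List.min?_eq_none_iff (κ := Int) _ id).mp h)) with ⟨m, hm⟩
  exact ⟨m, hm, by rw [pvSqF, hm]; rfl⟩

theorem pvSqF_le (f : Nat → Int) (s a : Nat) (h : a ≤ s) :
    pvSqF f s ≤ f a + f (s - a) := by
  rcases pvSqF_eq_some f s with ⟨m, hm, hv⟩
  have hmem : f a + f (s - a) ∈ ((List.range (s + 1)).map (fun a => f a + f (s - a))) :=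
    List.mem_map.mpr ⟨a, List.mem_range.mpr (by omega), rfl⟩
  have := PySem.List.min?_isMin hm _ hmem
  simpa [hv] using this

theorem pvSqF_exists (f : Nat → Int) (s : Nat) :
    ∃ a, a ≤ s ∧ pvSqF f s = f a + f (s - a) := by
  rcases pvSqF_eq_some f s with ⟨m, hm, hv⟩
  rcases List.mem_map.mp (PySem.List.min?_mem hm) with ⟨a, ha, hval⟩
  refine ⟨a, ?_, by rw [hv, ← hval]⟩
  have := List.mem_range.mp ha
  omega

-- subadditivity of the optimum
theorem pvH_super (c : Nat → Int) :
    ∀ b a : Nat, pvH c (a + b) ≤ pvH c a + pvH c b := by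
  intro b
  induction b using Nat.strong_induction_on with
  | _ b ihb =>
    intro a
    by_cases hb : b = 0
    · subst hb; simp [pvH_zero]
    · rcases pvH_exists c b (by omega) with ⟨d, h1, h2, hE⟩
      have hle : pvH c (a + b) ≤ pvH c (a + b - d) + c d := pvH_le c (a + b) d h1 (by omega)
      have he : a + b - d = a + (b - d) := by omega
      have ih := ihb (b - d) (by omega) a
      rw [he] at hle
      rw [hE]
      omega

theorem pvF_lower (c : Nat → Int) : ∀ t s, pvH c s ≤ pvF c t s := by
  intro t
  induction t with
  | zero =>
    intro s
    by_cases hs : s = 0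
    · subst hs; rw [pvH_zero]; simp [pvF]
    · have h1 : pvH c s ≤ pvH c (s - s) + c s := pvH_le c s s (by omega) (by omega)
      have h2 : pvH c 0 = 0 := pvH_zero c
      simp only [Nat.sub_self] at h1
      simp only [pvF, if_neg hs]
      omega
  | succ t ih =>
    intro s
    rcases pvSqF_exists (pvF c t) s with ⟨a, ha, hE⟩
    have hsplit : a + (s - a) = s := by omega
    have hsuper := pvH_super c (s - a) a
    rw [hsplit] at hsuper
    have h1 := ih a
    have h2 := ih (s - a)
    show pvH c s ≤ pvSqF (pvF c t) s
    rw [hE]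
    omega

-- the optimum is witnessed by a list of at most s positive parts
theorem pvH_list (c : Nat → Int) :
    ∀ s : Nat, ∃ l : List Nat, (∀ x ∈ l, 1 ≤ x) ∧ l.sum = s ∧ l.length ≤ s
        ∧ (l.map c).sum = pvH c s := by
  intro s
  induction s using Nat.strong_induction_on with
  | _ s ihs =>
    by_cases hs : s = 0
    · subst hs
      exact ⟨[], by simp, by simp, by simp, by rw [pvH_zero]; simp⟩
    · rcases pvH_exists c s (by omega) with ⟨d, h1, h2, hE⟩
      rcases ihs (s - d) (by omega) with ⟨l, hl1, hl2, hl3, hl4⟩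
      refine ⟨d :: l, ?_, by simp [hl2]; omega, by simp; omega, ?_⟩
      · intro x hx
        rcases List.mem_cons.mp hx with h | h
        · omega
        · exact hl1 x h
      · simp only [List.map_cons, List.sum_cons, hl4, hE]
        omega

-- after t squarings the vector is below the cost of any list of ≤ 2^t positive parts
theorem pvF_cost (c : Nat → Int) :
    ∀ t (l : List Nat), (∀ x ∈ l, 1 ≤ x) → l.length ≤ 2 ^ t →
      pvF c t l.sum ≤ (l.map c).sum := by
  intro t
  induction t with
  | zero =>
    intro l hpos hlen
    match l with
    | [] => simp [pvF]
    | [d] =>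
      have hd : 1 ≤ d := hpos d (by simp)
      simp [pvF, show d ≠ 0 by omega]
    | x :: y :: rest => simp at hlen
  | succ t ih =>
    intro l hpos hlen
    set l1 := l.take (2 ^ t) with hl1
    set l2 := l.drop (2 ^ t) with hl2
    have hsplit : l1 ++ l2 = l := List.take_append_drop _ _
    have hlen1 : l1.length ≤ 2 ^ t := by
      rw [hl1, List.length_take]; omega
    have hlen2 : l2.length ≤ 2 ^ t := by
      rw [hl2, List.length_drop]
      have : 2 ^ (t + 1) = 2 ^ t + 2 ^ t := by ring
      omega
    have hsum : l1.sum + l2.sum = l.sum := by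
      rw [← hsplit, List.sum_append]
    have hpos1 : ∀ x ∈ l1, 1 ≤ x := fun x hx => hpos x (by rw [← hsplit]; exact List.mem_append.mpr (Or.inl hx))
    have hpos2 : ∀ x ∈ l2, 1 ≤ x := fun x hx => hpos x (by rw [← hsplit]; exact List.mem_append.mpr (Or.inr hx))
    have h1 := ih l1 hpos1 hlen1
    have h2 := ih l2 hpos2 hlen2
    have hle : pvSqF (pvF c t) l.sum ≤ pvF c t l1.sum + pvF c t (l.sum - l1.sum) :=
      pvSqF_le (pvF c t) l.sum l1.sum (by omega)
    have he : l.sum - l1.sum = l2.sum := by omega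
    rw [he] at hle
    have hcost : (l.map c).sum = (l1.map c).sum + (l2.map c).sum := by
      rw [← hsplit, List.map_append, List.sum_append]
    show pvF c (t + 1) l.sum ≤ (l.map c).sum
    rw [pvF, hcost]
    omega

theorem pvFH (c : Nat → Int) (t s : Nat) (h : s ≤ 2 ^ t) : pvF c t s = pvH c s := by
  refine le_antisymm ?_ (pvF_lower c t s)
  rcases pvH_list c s with ⟨l, h1, h2, h3, h4⟩
  have := pvF_cost c t l h1 (by omega)
  rw [h2, h4] at this
  exact this

theorem pvTw_ge (r : Int) (t : Nat) : r ≤ (2 : Int) ^ (pvTw r t) := by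
  rw [pvTw]
  split
  · exact pvTw_ge r (t + 1)
  · exact not_lt.mp (by assumption)
termination_by (r - 2 ^ t).toNat
decreasing_by
  rename_i h
  have h1 : (0 : Int) < 2 ^ t := pow_pos (by norm_num) t
  have h2 : (2 : Int) ^ (t + 1) = 2 ^ t * 2 := pow_succ 2 t
  omega

theorem pvGetD_bound (xs : List Int) (i B : Int) (hB : 0 ≤ B)
    (h : ∀ x ∈ xs, -B ≤ x ∧ x ≤ B) :
    -B ≤ PySem.List.pyGetD xs i 0 ∧ PySem.List.pyGetD xs i 0 ≤ B := by
  by_cases hr : PySem.Raise.InRange xs.length i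
  · exact h _ (PySem.List.pyGetD_mem xs 0 hr)
  · rw [PySem.List.pyGetD_of_none xs i 0 ((PySem.List.pyGet?_eq_none_iff xs i).mpr hr)]
    omega

theorem pvSet_getD_self (l : List Int) (i : Nat) (a : Int) (h : i < l.length) :
    (l.set i a).getD i 0 = a := by
  rw [List.getD_eq_getElem?_getD, List.getElem?_set_self h]; rfl

theorem pvSet_getD_ne (l : List Int) (i j : Nat) (a : Int) (h : i ≠ j) :
    (l.set i a).getD j 0 = l.getD j 0 := by
  rw [List.getD_eq_getElem?_getD, List.getElem?_set_ne h, ← List.getD_eq_getElem?_getD]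

theorem pvRangeMap (t : Nat) :
    PySem.List.pyRange 1 ((t : Int) + 1) = (List.range t).map (fun k : Nat => ((k : Int) + 1)) := by
  induction t with
  | zero => simp [PySem.List.pyRange_one_eq_nil]
  | succ t ih =>
    have h1 : ((t + 1 : Nat) : Int) + 1 = ((t : Int) + 1) + 1 := by push_cast; ring
    rw [h1, PySem.List.pyRange_one_succ_right (by omega), ih, List.range_succ]
    simp

-- A's loss-array construction: entry d holds top - primes[m-d] for 1 ≤ d ≤ D
theorem pvLossA (primes : List Int) (m top : Int) (R : Nat) :
    ∀ D : Nat, D ≤ R →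
      (((PySem.List.pyRange 1 ((D : Int) + 1)).foldl
          (fun loss d => loss.set d.toNat (top - PySem.List.pyGetD primes (m - d) 0))
          (List.replicate (R + 1) (0 : Int))).length = R + 1
      ∧ ∀ d : Nat, 1 ≤ d → d ≤ D →
          ((PySem.List.pyRange 1 ((D : Int) + 1)).foldl
            (fun loss d => loss.set d.toNat (top - PySem.List.pyGetD primes (m - d) 0))
            (List.replicate (R + 1) (0 : Int))).getD d 0
          = top - PySem.List.pyGetD primes (m - (d : Int)) 0) := by
  intro D
  induction D with
  | zero =>
    intro _
    rw [PySem.List.pyRange_one_eq_nil (by norm_num)]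
    exact ⟨by simp, by omega⟩
  | succ D ih =>
    intro hDR
    rcases ih (by omega) with ⟨ihlen, ihval⟩
    have h1 : ((D + 1 : Nat) : Int) + 1 = ((D : Int) + 1) + 1 := by push_cast; ring
    rw [h1, PySem.List.pyRange_one_succ_right (by omega), List.foldl_append]
    simp only [List.foldl_cons, List.foldl_nil]
    set L := ((PySem.List.pyRange 1 ((D : Int) + 1)).foldl
          (fun loss d => loss.set d.toNat (top - PySem.List.pyGetD primes (m - d) 0))
          (List.replicate (R + 1) (0 : Int))) with hLdef
    have htn : ((D : Int) + 1).toNat = D + 1 := by omega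
    constructor
    · rw [List.length_set]; exact ihlen
    · intro d hd1 hd2
      rw [htn]
      by_cases hdD : d = D + 1
      · subst hdD
        rw [pvSet_getD_self _ _ _ (by omega)]
        congr 1
      · rw [pvSet_getD_ne _ _ _ _ (by omega)]
        exact ihval d hd1 (by omega)

-- A's inner loop: relaxing sums t..R with item dn turns a pvG (dn-1) table into a pvG dn table
theorem pvInnerA (c : Nat → Int) (R dn : Nat) (h1 : 1 ≤ dn) :
    ∀ k t : Nat, R + 1 - t ≤ k → dn ≤ t → t ≤ R + 1 →
    ∀ dp : List Int, dp.length = R + 1 →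
    (∀ s : Nat, s ≤ R → dp.getD s 0 = if s < t then pvG c dn s else pvG c (dn - 1) s) →
    (((PySem.List.pyRange (t : Int) ((R : Int) + 1)).foldl
        (fun dp s =>
          let cand := PySem.List.pyGetD dp (s - (dn : Int)) 0 + c dn
          if cand < PySem.List.pyGetD dp s 0 then dp.set s.toNat cand else dp)
        dp).length = R + 1
    ∧ ∀ s : Nat, s ≤ R →
      ((PySem.List.pyRange (t : Int) ((R : Int) + 1)).foldl
        (fun dp s =>
          let cand := PySem.List.pyGetD dp (s - (dn : Int)) 0 + c dn
          if cand < PySem.List.pyGetD dp s 0 then dp.set s.toNat cand else dp)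
        dp).getD s 0 = pvG c dn s) := by
  intro k
  induction k with
  | zero =>
    intro t hk ht1 ht2 dp hlen hinv
    have ht : t = R + 1 := by omega
    subst ht
    rw [PySem.List.pyRange_one_eq_nil (by push_cast; omega)]
    refine ⟨hlen, fun s hs => ?_⟩
    simpa [show s < R + 1 by omega] using hinv s hs
  | succ k ihk =>
    intro t hk ht1 ht2 dp hlen hinv
    by_cases htR : t = R + 1
    · subst htR
      rw [PySem.List.pyRange_one_eq_nil (by push_cast; omega)]
      refine ⟨hlen, fun s hs => ?_⟩
      simpa [show s < R + 1 by omega] using hinv s hs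
    · have htR' : t ≤ R := by omega
      rw [PySem.List.pyRange_one_cons (by push_cast; omega), List.foldl_cons]
      have hcast : (t : Int) + 1 = ((t + 1 : Nat) : Int) := by omega
      have hsub : (t : Int) - (dn : Int) = ((t - dn : Nat) : Int) := by omega
      have hread1 : PySem.List.pyGetD dp ((t : Int) - (dn : Int)) 0 = pvG c dn (t - dn) := by
        rw [hsub, PySem.List.pyGetD_natCast]
        have := hinv (t - dn) (by omega)
        rwa [if_pos (by omega)] at this
      have hread2 : PySem.List.pyGetD dp (t : Int) 0 = pvG c (dn - 1) t := by
        rw [PySem.List.pyGetD_natCast]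
        have := hinv t htR'
        rwa [if_neg (by omega)] at this
      have hGt : pvG c dn t = min (pvG c dn (t - dn) + c dn) (pvG c (dn - 1) t) := by
        have hdn : dn - 1 + 1 = dn := by omega
        calc pvG c dn t = pvG c (dn - 1 + 1) t := by rw [hdn]
          _ = min (pvG c (dn - 1 + 1) (t - (dn - 1 + 1)) + c (dn - 1 + 1)) (pvG c (dn - 1) t) :=
              pvG_succ_ge c (dn - 1) t (by omega)
          _ = min (pvG c dn (t - dn) + c dn) (pvG c (dn - 1) t) := by rw [hdn]
      simp only []
      rw [hread1, hread2]
      by_cases hlt : pvG c dn (t - dn) + c dn < pvG c (dn - 1) t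
      · rw [if_pos hlt]
        rw [hcast]
        refine ihk (t + 1) (by omega) (by omega) (by omega) _ (by rw [List.length_set]; exact hlen) ?_
        intro s hs
        have hts : ((t : Int)).toNat = t := by omega
        rw [hts]
        by_cases hst : s = t
        · subst hst
          rw [pvSet_getD_self _ _ _ (by omega), if_pos (by omega), hGt, min_eq_left (by omega)]
        · rw [pvSet_getD_ne _ _ _ _ (fun h => hst h.symm)]
          have := hinv s hs
          by_cases hst2 : s < t
          · rw [if_pos (show s < t + 1 by omega)]
            rwa [if_pos hst2] at this
          · rw [if_neg (by omega)]
            rwa [if_neg (by omega)] at this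
      · rw [if_neg hlt]
        rw [hcast]
        refine ihk (t + 1) (by omega) (by omega) (by omega) _ hlen ?_
        intro s hs
        have := hinv s hs
        by_cases hst : s = t
        · subst hst
          rw [if_pos (by omega), hGt, min_eq_right (by omega)]
          rwa [if_neg (by omega)] at this
        · by_cases hst2 : s < t
          · rw [if_pos (by omega)]
            rwa [if_pos (by omega)] at this
          · rw [if_neg (by omega)]
            rwa [if_neg (by omega)] at this

-- A's outer loop: after processing items 1..D the dp table is pvG c D
theorem pvOuterA (c : Nat → Int) (R : Nat) (L : List Int)
    (hL : ∀ d : Nat, 1 ≤ d → d ≤ R → PySem.List.pyGetD L (d : Int) 0 = c d) :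
    ∀ D : Nat, D ≤ R →
    (((PySem.List.pyRange 1 ((D : Int) + 1)).foldl
        (fun dp d =>
          let cc := PySem.List.pyGetD L d 0
          (PySem.List.pyRange d ((R : Int) + 1)).foldl
            (fun dp s =>
              let cand := PySem.List.pyGetD dp (s - d) 0 + cc
              if cand < PySem.List.pyGetD dp s 0 then dp.set s.toNat cand else dp)
            dp)
        ((List.replicate (R + 1) ((10 : Int) ^ 30)).set 0 0)).length = R + 1
    ∧ ∀ s : Nat, s ≤ R →
      ((PySem.List.pyRange 1 ((D : Int) + 1)).foldl
        (fun dp d =>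
          let cc := PySem.List.pyGetD L d 0
          (PySem.List.pyRange d ((R : Int) + 1)).foldl
            (fun dp s =>
              let cand := PySem.List.pyGetD dp (s - d) 0 + cc
              if cand < PySem.List.pyGetD dp s 0 then dp.set s.toNat cand else dp)
            dp)
        ((List.replicate (R + 1) ((10 : Int) ^ 30)).set 0 0)).getD s 0 = pvG c D s) := by
  intro D
  induction D with
  | zero =>
    intro _
    rw [PySem.List.pyRange_one_eq_nil (by norm_num)]
    simp only [List.foldl_nil]
    constructor
    · simp
    · intro s hs
      by_cases hs0 : s = 0
      · subst hs0
        rw [pvSet_getD_self _ _ _ (by simp)]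
        simp [pvG]
      · rw [pvSet_getD_ne _ _ _ _ (fun h => hs0 h.symm), List.getD_replicate _ (by omega)]
        simp [pvG, hs0]
  | succ D ih =>
    intro hDR
    rcases ih (by omega) with ⟨ihlen, ihval⟩
    have h1 : ((D + 1 : Nat) : Int) + 1 = ((D : Int) + 1) + 1 := by push_cast; ring
    rw [h1, PySem.List.pyRange_one_succ_right (by omega), List.foldl_append]
    simp only [List.foldl_cons, List.foldl_nil]
    have hcast2 : (D : Int) + 1 = ((D + 1 : Nat) : Int) := by push_cast; ring
    rw [hcast2, hL (D + 1) (by omega) (by omega)]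
    have := pvInnerA c R (D + 1) (by omega) (R + 1) (D + 1) (by omega) (by omega) (by omega)
      _ ihlen ?_
    · exact this
    · intro s hs
      by_cases hst : s < D + 1
      · rw [if_pos hst, pvG_succ_lt c D s hst]
        exact ihval s hs
      · rw [if_neg hst]
        simpa using ihval s hs

-- B's squaring step on lists computes pvSqF of the function the list represents
theorem pvSqList (R : Nat) (f : Nat → Int) (v : List Int)
    (hlen : v.length = R + 1) (hv : ∀ s : Nat, s ≤ R → v.getD s 0 = f s) :
    (((PySem.List.pyRange 0 ((R : Int) + 1)).map
        (fun s =>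
          (PySem.List.min?
            ((PySem.List.pyRange 0 (s + 1)).map
              (fun a => PySem.List.pyGetD v a 0 + PySem.List.pyGetD v (s - a) 0)) id).getD 0)).length = R + 1
    ∧ ∀ s : Nat, s ≤ R →
      ((PySem.List.pyRange 0 ((R : Int) + 1)).map
        (fun s =>
          (PySem.List.min?
            ((PySem.List.pyRange 0 (s + 1)).map
              (fun a => PySem.List.pyGetD v a 0 + PySem.List.pyGetD v (s - a) 0)) id).getD 0)).getD s 0
        = pvSqF f s) := by
  have hcast : (R : Int) + 1 = ((R + 1 : Nat) : Int) := by push_cast; ring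
  rw [hcast, PySem.List.pyRange_zero_natCast (R + 1), List.map_map]
  constructor
  · simp
  · intro s hs
    rw [List.getD_eq_getElem?_getD, List.getElem?_map, List.getElem?_range (by omega)]
    simp only [Option.map_some, Option.getD_some, Function.comp]
    have hinner : (PySem.List.pyRange 0 ((s : Int) + 1)).map
        (fun a => PySem.List.pyGetD v a 0 + PySem.List.pyGetD v ((s : Int) - a) 0)
        = (List.range (s + 1)).map (fun a => f a + f (s - a)) := by
      have hc2 : (s : Int) + 1 = ((s + 1 : Nat) : Int) := by push_cast; ring
      rw [hc2, PySem.List.pyRange_zero_natCast (s + 1), List.map_map]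
      refine List.map_congr_left ?_
      intro a ha
      have ha' := List.mem_range.mp ha
      simp only [Function.comp]
      have e1 : (s : Int) - (a : Int) = ((s - a : Nat) : Int) := by omega
      rw [PySem.List.pyGetD_natCast, e1, PySem.List.pyGetD_natCast,
        hv a (by omega), hv (s - a) (by omega)]
    rw [hinner]
    rfl

-- B's fold: after k squarings the vector represents pvF c k on 0..R
theorem pvFoldB (R : Nat) (c : Nat → Int) (v0 : List Int)
    (hlen0 : v0.length = R + 1) (hv0 : ∀ s : Nat, s ≤ R → v0.getD s 0 = pvF c 0 s) :
    ∀ k : Nat,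
      (((List.range k).foldl
          (fun v _ =>
            (PySem.List.pyRange 0 ((R : Int) + 1)).map
              (fun s =>
                (PySem.List.min?
                  ((PySem.List.pyRange 0 (s + 1)).map
                    (fun a => PySem.List.pyGetD v a 0 + PySem.List.pyGetD v (s - a) 0)) id).getD 0))
          v0).length = R + 1
      ∧ ∀ s : Nat, s ≤ R →
        ((List.range k).foldl
          (fun v _ =>
            (PySem.List.pyRange 0 ((R : Int) + 1)).map
              (fun s =>
                (PySem.List.min?
                  ((PySem.List.pyRange 0 (s + 1)).map
                    (fun a => PySem.List.pyGetD v a 0 + PySem.List.pyGetD v (s - a) 0)) id).getD 0))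
          v0).getD s 0 = pvF c k s) := by
  intro k
  induction k with
  | zero => exact ⟨hlen0, hv0⟩
  | succ k ih =>
    rw [List.range_succ, List.foldl_append, List.foldl_cons, List.foldl_nil]
    rcases ih with ⟨ihlen, ihval⟩
    have := pvSqList R (pvF c k) _ ihlen ihval
    exact ⟨this.1, fun s hs => by rw [this.2 s hs]; rfl⟩

-- ===== VERDICT (by name: the statement is the Claim_ definition above) =====
theorem min_prime_loss_for_reduction_spec : Claim_equal_min_prime_loss_for_reduction := by
  intro primes reduction hDom hPre
  unfold Spec_min_prime_loss_for_reduction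
  obtain ⟨hge, hor⟩ := hPre
  by_cases hz : reduction = 0
  · simp [min_prime_loss_for_reduction, min_prime_loss_for_reduction_alt, hz]
  · rcases hor with hz' | ⟨hlen, hub⟩
    · exact absurd hz' hz
    have hred : reduction = (reduction.toNat : Int) := (Int.toNat_of_nonneg hge).symm
    set R : Nat := reduction.toNat with hRdef
    have hR1 : 1 ≤ R := by omega
    have hRz : ¬ ((R : Int) = 0) := by omega
    have hbeq : (((R : Int)) == 0) = false := beq_eq_false_iff_ne.mpr hRz
    rw [hred]
    simp only [min_prime_loss_for_reduction, min_prime_loss_for_reduction_alt, hbeq,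
      Bool.false_eq_true, if_false]
    have htn : (((R : Int)) + 1).toNat = R + 1 := by omega
    rw [htn]
    set m : Int := ((primes.length : Int) - 1) with hm
    set top : Int := PySem.List.pyGetD primes m 0 with htop
    -- cost function shared by the two characterizations
    set cF : Nat → Int := fun d => top - PySem.List.pyGetD primes (m - (d : Int)) 0 with hcF
    -- Dom bound on every table entry read from primes
    have hDb : ∀ x ∈ primes, -(2147483648 : Int) ≤ x ∧ x ≤ 2147483648 := by
      unfold Dom_min_prime_loss_for_reduction at hDom
      simp only [Bool.and_eq_true, List.all_eq_true, pvDomInt, decide_eq_true_eq] at hDom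
      intro x hx
      have := hDom.1 x hx
      omega
    have htopb := pvGetD_bound primes m 2147483648 (by norm_num) hDb
    have hc : ∀ d : Nat, 1 ≤ d → cF d < 10 ^ 30 := by
      intro d _
      have hxb := pvGetD_bound primes (m - (d : Int)) 2147483648 (by norm_num) hDb
      simp only [hcF, htop]
      omega
    -- A's side
    set pvL : List Int := ((PySem.List.pyRange 1 ((R : Int) + 1)).foldl
          (fun loss d => loss.set d.toNat (top - PySem.List.pyGetD primes (m - d) 0))
          (List.replicate (R + 1) (0 : Int))) with hpvL
    have hLoss := pvLossA primes m top R R le_rfl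
    have hL : ∀ d : Nat, 1 ≤ d → d ≤ R → PySem.List.pyGetD pvL (d : Int) 0 = cF d := by
      intro d h1 h2
      rw [PySem.List.pyGetD_natCast, hpvL, hLoss.2 d h1 h2, hcF]
    have houter := (pvOuterA cF R pvL hL R le_rfl).2 R le_rfl
    -- B's side: initial vector represents pvF cF 0 on 0..R
    set v0 : List Int := (0 : Int) :: (PySem.List.pyRange 1 ((R : Int) + 1)).map
        (fun d => top - PySem.List.pyGetD primes (m - d) 0) with hv0def
    have hlen0 : v0.length = R + 1 := by
      rw [hv0def, List.length_cons, pvRangeMap R]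
      simp
    have hv0 : ∀ s : Nat, s ≤ R → v0.getD s 0 = pvF cF 0 s := by
      intro s hs
      match s with
      | 0 => simp [hv0def, pvF]
      | s + 1 =>
        rw [hv0def, List.getD_cons_succ, pvRangeMap R, List.map_map,
          List.getD_eq_getElem?_getD, List.getElem?_map, List.getElem?_range (by omega)]
        simp only [Option.map_some, Option.getD_some, Function.comp]
        have : pvF cF 0 (s + 1) = cF (s + 1) := by simp [pvF]
        rw [this, hcF]
        norm_num
    set tq : Nat := pvTw (R : Int) 0 with htq
    have hfold := (pvFoldB R cF v0 hlen0 hv0 tq).2 R le_rfl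
    have ht2 : R ≤ 2 ^ tq := by
      have h := pvTw_ge (R : Int) 0
      rw [← htq] at h
      have h2 : ((2 : Int) ^ tq) = ((2 ^ tq : Nat) : Int) := by push_cast; ring
      rw [h2] at h
      exact_mod_cast h
    rw [PySem.List.pyGetD_natCast, PySem.List.pyGetD_natCast, houter, hfold,
      pvFH cF tq R ht2]
    exact pvGH cF hc R R le_rfl
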